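-- pv_equiv track=rewrite | github.com/HoffmannV/bookbot | main.py | generate_report
-- ===== SOURCE A (Python) =====
-- def count_words(text):
--     words = text.split()
--     return len(words)
--
-- def count_chars(text):
--     text = text.lower().replace(' ', '')
--     char_dict = dict()
--
--     for char in text:
--         if char in char_dict:
--             char_dict[char] += 1
--         else:
--             char_dict[char] = 1
--
--     return char_dict
--
-- def generate_report(text, name):
--     word_count = count_words(text)
--     char_dict = dict(sorted(count_chars(text).items(), key=lambda x:x[1], reverse=True))
--
--     report = f"--- Begin report of books ---\n{word_count} words found in the document\\{name}\n"
--     for char in char_dict.keys():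
--         if char.isalpha():
--             report += f"\nThe \'{char}\' character was found {char_dict[char]} times"
--
--     report += "\n--- End report ---"
--     return report
-- ===== SOURCE B (Python) =====
-- def generate_report(text, name):
--     cleaned = text.lower().replace(' ', '')
--     counts = {}
--     for ch in cleaned:
--         counts[ch] = counts.get(ch, 0) + 1
--     lines = []
--     for v in sorted(set(counts.values()), reverse=True):
--         for ch, n in counts.items():
--             if n == v and ch.isalpha():
--                 lines.append(f"\nThe '{ch}' character was found {n} times")
--     return (f"--- Begin report of books ---\n{len(text.split())} words found in the document\\{name}\n"
--             + "".join(lines)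
--             + "\n--- End report ---")
-- ===== Notes on version B (the rewrite author's own statement) =====
-- stated objective: alternative
-- what changed: B never sorts the (char,count) items: it counts in one pass with dict.get, then emits the report counting-sort style by sorting only the distinct count values descending and scanning the count dict once per value (first-insertion order within each value, matching A's stable sort), joining the lines instead of repeated +=.
import Mathlib
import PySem

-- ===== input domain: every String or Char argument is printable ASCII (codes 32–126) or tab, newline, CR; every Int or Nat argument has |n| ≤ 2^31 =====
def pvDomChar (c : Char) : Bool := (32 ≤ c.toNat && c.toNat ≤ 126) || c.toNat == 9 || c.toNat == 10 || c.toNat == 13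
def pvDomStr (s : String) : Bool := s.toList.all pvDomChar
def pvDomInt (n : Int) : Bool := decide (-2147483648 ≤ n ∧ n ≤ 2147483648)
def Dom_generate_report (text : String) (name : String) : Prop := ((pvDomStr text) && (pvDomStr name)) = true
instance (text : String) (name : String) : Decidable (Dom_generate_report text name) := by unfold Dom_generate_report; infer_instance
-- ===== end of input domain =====

-- B replaces A's stable sort of the (char, count) items by a counting-sort-style pass: it sorts only the
-- DISTINCT count values descending and, per value, scans the count dict in insertion order (objective:
-- alternative decomposition, same observable output; no speed claim).

-- ===== PORT A =====
def pvA_count_words (text : String) : Int :=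
  ((PySem.Str.split₀ text).length : Int)

def pvA_count_chars (text : String) : PySem.Dict Char Int :=
  let t := PySem.Chars.replace (PySem.Chars.lower text.toList) [' '] []
  t.foldl (fun d c =>
    if d.contains c then d.insert c (d.getD c 0 + 1) else d.insert c 1) PySem.Dict.empty

def generate_report (text : String) (name : String) : String :=
  let word_count := pvA_count_words text
  let char_dict : PySem.Dict Char Int :=
    PySem.Dict.mk (PySem.List.sorted (pvA_count_chars text).items (fun x => x.2) true)
  let report : List Char :=
    "--- Begin report of books ---\n".toList ++ PySem.Int.toChars word_count ++
      " words found in the document\\".toList ++ name.toList ++ "\n".toList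
  -- char_dict[char]: the key is always present (char ranges over char_dict's keys), so getD is exact here
  let report := char_dict.keys.foldl (fun report char =>
    if PySem.Chars.isalpha char then
      report ++ "\nThe '".toList ++ [char] ++ "' character was found ".toList ++
        PySem.Int.toChars (char_dict.getD char 0) ++ " times".toList
    else report) report
  String.ofList (report ++ "\n--- End report ---".toList)

-- ===== PORT B =====
def generate_report_alt (text : String) (name : String) : String :=
  let cleaned := PySem.Chars.replace (PySem.Chars.lower text.toList) [' '] []
  let counts : PySem.Dict Char Int :=
    cleaned.foldl (fun d ch => d.insert ch (d.getD ch 0 + 1)) PySem.Dict.empty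
  let lines : List (List Char) :=
    (PySem.List.sorted (PySem.Set.ofList counts.values) (fun v => v) true).foldl
      (fun lines v =>
        counts.items.foldl (fun lines p =>
          if p.2 == v && PySem.Chars.isalpha p.1 then
            lines ++ ["\nThe '".toList ++ [p.1] ++ "' character was found ".toList ++
              PySem.Int.toChars p.2 ++ " times".toList]
          else lines) lines) []
  String.ofList
    ("--- Begin report of books ---\n".toList ++
      PySem.Int.toChars ((PySem.Str.split₀ text).length : Int) ++
      " words found in the document\\".toList ++ name.toList ++ "\n".toList ++
      PySem.Chars.join [] lines ++ "\n--- End report ---".toList)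

-- ===== PRECONDITION & SPEC =====
def Spec_generate_report (text : String) (name : String) (out : String) : Prop := out = generate_report_alt text name
instance (text : String) (name : String) (out : String) : Decidable (Spec_generate_report text name out) := by unfold Spec_generate_report; infer_instance

-- ===== CLAIM (what is proved, stated in full; the proofs are below) =====
def Claim_equal_generate_report : Prop := ∀ (text : String) (name : String), Dom_generate_report text name → Spec_generate_report text name (generate_report text name)

-- ===== LEMMAS AND PROOFS =====

-- inserting an element before which nothing in bs comes keeps bs's head position
theorem pv_insertBy_cons_of_all_before {α : Type} (before : α → α → Bool) (x : α) (bs : List α)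
    (h : ∀ y ∈ bs, before x y = true) :
    PySem.List.insertBy before x bs = x :: bs := by
  cases bs with
  | nil => rfl
  | cons y ys => simp [PySem.List.insertBy, h y (by simp)]

theorem pv_insertBy_append_of_not_before {α : Type} (before : α → α → Bool) (x : α)
    (as bs : List α) (h : ∀ a ∈ as, before x a = false) :
    PySem.List.insertBy before x (as ++ bs) = as ++ PySem.List.insertBy before x bs := by
  induction as with
  | nil => simp
  | cons a as ih =>
    have ha := h a (by simp)
    simp only [List.cons_append, PySem.List.insertBy, ha]
    simp only [Bool.false_eq_true, if_false]
    rw [ih (fun a' ha' => h a' (by simp [ha']))]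

-- inserting x into the bucketed arrangement appends x to its own (strictly descending) bucket
theorem pv_insertBy_flatMap {α : Type} (key : α → Int) (x : α) (ys : List α) (V : List Int)
    (hdesc : V.Pairwise (fun a b => b < a)) (hx : key x ∈ V) :
    PySem.List.insertBy (fun a b => decide (key b < key a)) x
      (V.flatMap (fun v => ys.filter (fun y => key y == v)))
    = V.flatMap (fun v => (ys ++ [x]).filter (fun y => key y == v)) := by
  induction V with
  | nil => simp at hx
  | cons v V ih =>
    rcases List.pairwise_cons.mp hdesc with ⟨hv_lt, hdesc'⟩
    simp only [List.flatMap_cons]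
    by_cases hxv : key x = v
    · rw [pv_insertBy_append_of_not_before _ _ _ _ (by
        intro a ha
        simp only [List.mem_filter, beq_iff_eq] at ha
        simp [ha.2, hxv])]
      rw [pv_insertBy_cons_of_all_before _ _ _ (by
        intro y hy
        simp only [List.mem_flatMap, List.mem_filter, beq_iff_eq] at hy
        obtain ⟨w, hw, _, hkey⟩ := hy
        simp [hkey, hxv]
        exact hv_lt w hw)]
      have hb : (ys ++ [x]).filter (fun y => key y == v)
          = ys.filter (fun y => key y == v) ++ [x] := by
        simp [List.filter_append, hxv]
      have hrest : V.flatMap (fun w => (ys ++ [x]).filter (fun y => key y == w))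
          = V.flatMap (fun w => ys.filter (fun y => key y == w)) := by
        simp only [List.flatMap_def]
        congr 1
        apply List.map_congr_left
        intro w hw
        have : key x ≠ w := by
          have := hv_lt w hw; omega
        simp [List.filter_append, this]
      rw [hb, hrest]
      simp
    · have hx' : key x ∈ V := by
        rcases List.mem_cons.mp hx with h | h
        · exact absurd h hxv
        · exact h
      have hxlt : key x < v := hv_lt _ hx'
      rw [pv_insertBy_append_of_not_before _ _ _ _ (by
        intro a ha
        simp only [List.mem_filter, beq_iff_eq] at ha
        simp [ha.2]
        omega)]
      rw [ih hdesc' hx']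
      have hb : (ys ++ [x]).filter (fun y => key y == v)
          = ys.filter (fun y => key y == v) := by
        simp [List.filter_append, hxv]
      rw [hb]

-- a stable descending sort is the concatenation of the original-order buckets,
-- one per key value, taken in strictly descending key order
theorem pv_sorted_rev_eq_flatMap_filter {α : Type} (key : α → Int) (xs : List α) (V : List Int)
    (hdesc : V.Pairwise (fun a b => b < a)) (hmem : ∀ x ∈ xs, key x ∈ V) :
    PySem.List.sorted xs key true = V.flatMap (fun v => xs.filter (fun x => key x == v)) := by
  induction xs using List.reverseRecOn with
  | nil => simp [PySem.List.sorted]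
  | append_singleton ys x ih =>
    rw [PySem.List.sorted_rev_eq_foldl_insertBy, List.foldl_append]
    simp only [List.foldl_cons, List.foldl_nil]
    rw [← PySem.List.sorted_rev_eq_foldl_insertBy]
    rw [ih (fun y hy => hmem y (by simp [hy]))]
    exact pv_insertBy_flatMap key x ys V hdesc (hmem x (by simp))

-- A's accumulation loop is Counter(t), so its items are the distinct chars with their counts
theorem pvA_count_chars_items (text : String) :
    (pvA_count_chars text).items
      = (PySem.Set.ofList (PySem.Chars.replace (PySem.Chars.lower text.toList) [' '] [])).map
          (fun k => (k, ((PySem.Chars.replace (PySem.Chars.lower text.toList) [' '] []).count k : Int))) := by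
  unfold pvA_count_chars
  have h : ∀ (d : PySem.Dict Char Int) (c : Char),
      (if d.contains c then d.insert c (d.getD c 0 + 1) else d.insert c 1)
        = d.insert c (d.getD c 0 + 1) := by
    intro d c
    by_cases hc : d.contains c
    · simp [hc]
    · simp only [Bool.not_eq_true] at hc
      simp [hc, PySem.Dict.getD_of_not_contains _ _ hc]
  dsimp only
  rw [PySem.List.foldl_congr_mem _ _ _ _ (fun d c _ => h d c),
    PySem.Dict.foldl_insert_getD_add_one_eq_counter, PySem.Dict.items_counter]

theorem pv_join_nil_flatten (ps : List (List Char)) :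
    PySem.Chars.join [] ps = ps.flatten := by
  induction ps with
  | nil => rfl
  | cons h t ih =>
    cases t with
    | nil => simp [PySem.Chars.join, List.intercalate]
    | cons a u =>
      simp only [PySem.Chars.join, List.intercalate, List.intersperse] at *
      simpa using ih

set_option maxHeartbeats 1600000 in
theorem generate_report_eq_alt (text name : String) :
    generate_report text name = generate_report_alt text name := by
  unfold generate_report generate_report_alt
  simp only [pvA_count_words, pvA_count_chars_items,
    PySem.Dict.foldl_insert_getD_add_one_eq_counter, PySem.Dict.items_counter]
  set t := PySem.Chars.replace (PySem.Chars.lower text.toList) [' '] [] with ht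
  set items := (PySem.Set.ofList t).map (fun k => (k, (t.count k : Int))) with hitems
  set S := PySem.List.sorted items (fun x => x.2) true with hS
  set V := PySem.List.sorted (PySem.Set.ofList ((PySem.Dict.counter t).values))
      (fun v => v) true with hV
  -- facts about S's keys
  have hpermS : S.Perm items := by rw [hS]; exact PySem.List.sorted_perm _ _ _
  have hfst : items.map (fun p => p.1) = PySem.Set.ofList t := by
    rw [hitems]; simp [List.map_map]; exact List.map_id _
  have hnodup : (S.map (fun p => p.1)).Nodup := by
    refine ((hpermS.map (fun p => p.1)).nodup_iff).2 ?_
    rw [hfst]; exact PySem.Set.nodup_ofList _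
  have hget : ∀ p ∈ S, (PySem.Dict.mk S).getD p.1 0 = p.2 := by
    intro p hp
    exact PySem.Dict.getD_of_mem_items (PySem.Dict.mk S) hp hnodup 0
  have hkeys : (PySem.Dict.mk S).keys = S.map (fun p => p.1) := rfl
  -- V is strictly descending and covers every item's count
  have hvals : (PySem.Dict.counter t).values = items.map (fun p => p.2) := by
    simp [PySem.Dict.values, PySem.Dict.items_counter, hitems]
  have hdesc : V.Pairwise (fun a b => b < a) := by
    have h1 : V.Pairwise (fun a b : Int => b ≤ a) :=
      PySem.List.sorted_pairwise_rev _ _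
    have h2 : V.Nodup := by
      refine ((PySem.List.sorted_perm _ _ _).nodup_iff).2 ?_
      exact PySem.Set.nodup_ofList _
    exact (h1.and h2).imp (fun {a b} h => lt_of_le_of_ne h.1 (Ne.symm h.2))
  have hmem : ∀ p ∈ items, (fun q : Char × Int => q.2) p ∈ V := by
    intro p hp
    rw [hV, PySem.List.mem_sorted, PySem.Set.mem_ofList, hvals]
    exact List.mem_map_of_mem hp
  have hSb : S = V.flatMap (fun v => items.filter (fun p => p.2 == v)) := by
    rw [hS]
    exact pv_sorted_rev_eq_flatMap_filter (fun p => p.2) items V hdesc hmem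
  -- normalise A's report loop
  rw [hkeys]
  rw [PySem.List.foldl_congr_mem _ _
    (fun acc c =>
      if PySem.Chars.isalpha c then
        acc ++ ("\nThe '".toList ++ [c] ++ "' character was found ".toList ++
          PySem.Int.toChars ((PySem.Dict.mk S).getD c 0) ++ " times".toList)
      else acc)
    _ (by intro acc c _; split_ifs with hc <;> simp [hc])]
  rw [PySem.List.foldl_if_eq_foldl_filter, PySem.List.foldl_append_eq_flatMap]
  -- normalise B's report loop
  have hinner : ∀ (ls : List (List Char)) (v : Int),
      items.foldl (fun ls p =>
        if p.2 == v && PySem.Chars.isalpha p.1 then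
          ls ++ ["\nThe '".toList ++ [p.1] ++ "' character was found ".toList ++
            PySem.Int.toChars p.2 ++ " times".toList]
        else ls) ls
      = ls ++ (items.filter (fun p => p.2 == v && PySem.Chars.isalpha p.1)).map
          (fun p => "\nThe '".toList ++ [p.1] ++ "' character was found ".toList ++
            PySem.Int.toChars p.2 ++ " times".toList) := by
    intro ls v
    exact PySem.List.foldl_append_if _ _ _ _
  rw [PySem.List.foldl_congr_mem _ _
    (fun ls (v : Int) =>
      ls ++ (items.filter (fun p => p.2 == v && PySem.Chars.isalpha p.1)).map
        (fun p => "\nThe '".toList ++ [p.1] ++ "' character was found ".toList ++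
          PySem.Int.toChars p.2 ++ " times".toList))
    _ (by intro ls v _; exact hinner ls v)]
  rw [PySem.List.foldl_append_eq_flatMap, pv_join_nil_flatten]
  simp only [List.nil_append]
  congr 1
  congr 1
  rw [List.filter_map, List.flatMap_def, List.map_map]
  have hcomp : (PySem.Chars.isalpha ∘ fun p : Char × Int => p.1)
      = (fun p : Char × Int => PySem.Chars.isalpha p.1) := rfl
  rw [hcomp]
  have hmap := List.map_congr_left
    (l := List.filter (fun p : Char × Int => PySem.Chars.isalpha p.1) S)
    (f := (fun c => "\nThe '".toList ++ [c] ++ "' character was found ".toList ++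
      PySem.Int.toChars ((PySem.Dict.mk S).getD c 0) ++ " times".toList) ∘ fun p => p.1)
    (g := fun p : Char × Int => "\nThe '".toList ++ [p.1] ++ "' character was found ".toList ++
      PySem.Int.toChars p.2 ++ " times".toList)
    (by intro p hp
        simp only [Function.comp]
        rw [hget p (List.mem_of_mem_filter hp)])
  rw [hmap, hSb, List.filter_flatMap, ← List.flatMap_def]
  rw [List.flatMap_assoc]
  have hflat : ∀ (M : Int → List (List Char)),
      (V.flatMap M).flatten = V.flatMap (fun v => (M v).flatten) := by
    intro M
    simp only [List.flatMap_def, List.flatten_flatten, List.map_map]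
    rfl
  rw [hflat]
  congr 1
  refine congrArg (fun F => List.flatMap F V) (funext fun v => ?_)
  rw [List.filter_filter, ← List.flatMap_def]
  congr 1
  apply List.filter_congr
  intro p _
  rw [Bool.and_comm]

-- ===== VERDICT (by name: the statement is the Claim_ definition above) =====
theorem generate_report_spec : Claim_equal_generate_report := by
  intro text name _
  unfold Spec_generate_report
  exact generate_report_eq_alt text name
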